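-- pv_equiv track=rewrite | github.com/rrozema12/SalaryClassifier | analysis.py | frequencies_for_cutoffs
-- ===== SOURCE A (Python) =====
-- def frequencies_for_cutoffs(col, cutoffs):
--     # Sets each frequency to 0 by default
--     freqs = [0] * len(cutoffs)
--
--     for el in col:
--         for i in range(len(cutoffs)):
--             if el <= cutoffs[i]:
--                 freqs[i] += 1
--                 break
--     return freqs
-- ===== SOURCE B (Python) =====
-- def frequencies_for_cutoffs(col, cutoffs):
--     # Only cutoffs that exceed the running maximum of all earlier cutoffs can
--     # ever catch an element ("effective" buckets); their values are strictly
--     # increasing, so each element's bucket is found by binary search.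
--     eff = []  # (cutoff value, original index), values strictly increasing
--     run = None
--     for i, c in enumerate(cutoffs):
--         if run is None or c > run:
--             eff.append((c, i))
--             run = c
--     freqs = [0] * len(cutoffs)
--     for el in col:
--         lo, hi = 0, len(eff)
--         while lo < hi:
--             mid = (lo + hi) // 2
--             if eff[mid][0] < el:
--                 lo = mid + 1
--             else:
--                 hi = mid
--         if lo < len(eff):
--             freqs[eff[lo][1]] += 1
--     return freqs
-- ===== Notes on version B (the rewrite author's own statement) =====
-- stated objective: faster
-- what changed: Instead of scanning all cutoffs per element, B precomputes the strictly increasing subsequence of prefix-maximum cutoffs (the only buckets that can ever catch an element) and binary-searches each element into it.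
import Mathlib
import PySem

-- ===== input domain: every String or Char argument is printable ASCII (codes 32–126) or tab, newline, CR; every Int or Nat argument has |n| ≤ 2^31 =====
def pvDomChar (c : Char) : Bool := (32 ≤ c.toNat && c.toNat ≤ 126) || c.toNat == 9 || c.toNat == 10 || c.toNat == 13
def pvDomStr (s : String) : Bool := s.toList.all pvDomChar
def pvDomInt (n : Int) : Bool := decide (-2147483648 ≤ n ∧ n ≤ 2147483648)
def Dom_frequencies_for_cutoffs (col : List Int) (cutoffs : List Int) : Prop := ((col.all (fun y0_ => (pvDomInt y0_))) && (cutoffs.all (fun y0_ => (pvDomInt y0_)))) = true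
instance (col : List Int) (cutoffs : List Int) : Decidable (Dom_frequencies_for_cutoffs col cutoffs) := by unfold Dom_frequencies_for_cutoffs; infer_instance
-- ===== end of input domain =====

-- B replaces A's per-element scan of all cutoffs by a precomputed strictly increasing
-- list of prefix-maximum cutoffs plus a binary search per element (measurably faster).

-- ===== PORT A =====

-- freqs[i] += 1  (index always in range in A)
def incAt : List Int → Nat → List Int
  | [], _ => []
  | x :: xs, 0 => (x + 1) :: xs
  | x :: xs, n + 1 => x :: incAt xs n

-- A's inner loop: 'for i in range(len(cutoffs)): if el <= cutoffs[i]: …; break'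
def firstLE (el : Int) : List Int → Nat → Option Nat
  | [], _ => none
  | c :: rest, i => if el ≤ c then some i else firstLE el rest (i + 1)

def frequencies_for_cutoffs (col : List Int) (cutoffs : List Int) : List Int :=
  col.foldl (fun freqs el =>
    match firstLE el cutoffs 0 with
    | some i => incAt freqs i
    | none => freqs) (List.replicate cutoffs.length 0)

-- ===== PORT B =====

-- B's first loop: effective buckets (cutoff value, original index), run = running max
def effList : List Int → Nat → Option Int → List (Int × Nat)
  | [], _, _ => []
  | c :: rest, i, none => (c, i) :: effList rest (i + 1) (some c)
  | c :: rest, i, some r =>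
      if r < c then (c, i) :: effList rest (i + 1) (some c)
      else effList rest (i + 1) (some r)

-- B's while loop: binary search for first position with el <= eff[mid][0]
def bsearch (eff : List (Int × Nat)) (el : Int) (lo hi : Nat) : Nat :=
  if h : lo < hi then
    if (eff.getD ((lo + hi) / 2) (0, 0)).1 < el then bsearch eff el ((lo + hi) / 2 + 1) hi
    else bsearch eff el lo ((lo + hi) / 2)
  else lo
termination_by hi - lo
decreasing_by all_goals omega

def frequencies_for_cutoffs_alt (col : List Int) (cutoffs : List Int) : List Int :=
  let eff := effList cutoffs 0 none
  col.foldl (fun freqs el =>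
    let lo := bsearch eff el 0 eff.length
    if h : lo < eff.length then incAt freqs (eff[lo].2) else freqs)
    (List.replicate cutoffs.length 0)

-- ===== PRECONDITION & SPEC =====
def Spec_frequencies_for_cutoffs (col : List Int) (cutoffs : List Int) (out : List Int) : Prop := out = frequencies_for_cutoffs_alt col cutoffs
instance (col : List Int) (cutoffs : List Int) (out : List Int) : Decidable (Spec_frequencies_for_cutoffs col cutoffs out) := by unfold Spec_frequencies_for_cutoffs; infer_instance

-- ===== CLAIM (what is proved, stated in full; the proofs are below) =====
def Claim_equal_frequencies_for_cutoffs : Prop := ∀ (col : List Int) (cutoffs : List Int), Dom_frequencies_for_cutoffs col cutoffs → Spec_frequencies_for_cutoffs col cutoffs (frequencies_for_cutoffs col cutoffs)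

-- ===== LEMMAS AND PROOFS =====

-- values of effList are strictly increasing and all exceed the running max
theorem effList_gt (cutoffs : List Int) : ∀ (i : Nat) (r : Int),
    ∀ p ∈ effList cutoffs i (some r), r < p.1 := by
  induction cutoffs with
  | nil => intro i r p hp; simp [effList] at hp
  | cons c rest ih =>
    intro i r p hp
    simp only [effList] at hp
    split_ifs at hp with hrc
    · rcases List.mem_cons.mp hp with h | h
      · subst h; exact hrc
      · exact lt_trans hrc (ih (i + 1) c p h)
    · exact ih (i + 1) r p hp

theorem effList_sorted (cutoffs : List Int) : ∀ (i : Nat) (run : Option Int),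
    (effList cutoffs i run).Pairwise (fun p q => p.1 < q.1) := by
  induction cutoffs with
  | nil => intro i run; cases run <;> simp [effList]
  | cons c rest ih =>
    intro i run
    cases run with
    | none =>
      simp only [effList]
      exact List.pairwise_cons.mpr ⟨fun q hq => effList_gt rest (i+1) c q hq, ih (i+1) (some c)⟩
    | some r =>
      simp only [effList]
      split_ifs with hrc
      · exact List.pairwise_cons.mpr ⟨fun q hq => effList_gt rest (i+1) c q hq, ih (i+1) (some c)⟩
      · exact ih (i + 1) (some r)

-- linear first-match over the effective list
def lookupEff : List (Int × Nat) → Int → Option Nat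
  | [], _ => none
  | (v, idx) :: rest, el => if el ≤ v then some idx else lookupEff rest el

-- A's inner scan equals the first match over the effective list
theorem firstLE_eq_lookup (el : Int) (cutoffs : List Int) : ∀ (i : Nat) (run : Option Int),
    (∀ r, run = some r → r < el) →
    firstLE el cutoffs i = lookupEff (effList cutoffs i run) el := by
  induction cutoffs with
  | nil => intro i run _; cases run <;> simp [firstLE, effList, lookupEff]
  | cons c rest ih =>
    intro i run hrun
    cases run with
    | none =>
      simp only [firstLE, effList, lookupEff]
      split_ifs with h
      · rfl
      · exact ih (i + 1) (some c) (by intro r hr; cases hr; omega)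
    | some r =>
      have hr : r < el := hrun r rfl
      simp only [firstLE, effList]
      split_ifs with h hrc
      · -- el ≤ c, so r < el ≤ c hence eff keeps (c,i) first
        have : r < c := lt_of_lt_of_le hr h
        simp [lookupEff, h]
      · -- el ≤ c contradicts ¬ r < c together with r < el
        omega
      · simp only [lookupEff, if_neg h]
        exact ih (i + 1) (some c) (by intro r' hr'; cases hr'; omega)
      · exact ih (i + 1) (some r) (by intro r' hr'; cases hr'; exact hr)

-- binary search on a strictly increasing list finds the first position with el ≤ value
theorem bsearch_spec (eff : List (Int × Nat)) (el : Int)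
    (hs : eff.Pairwise (fun p q => p.1 < q.1)) :
    ∀ (lo hi : Nat), lo ≤ hi → hi ≤ eff.length →
    (∀ k (hk : k < eff.length), k < lo → (eff[k]).1 < el) →
    (∀ k (hk : k < eff.length), hi ≤ k → el ≤ (eff[k]).1) →
    (∀ k (hk : k < eff.length), bsearch eff el lo hi ≤ k ↔ ¬ (eff[k]).1 < el) ∧
      bsearch eff el lo hi ≤ eff.length := by
  have hmono : ∀ (a b : Nat) (ha : a < eff.length) (hb : b < eff.length),
      a ≤ b → (eff[a]).1 ≤ (eff[b]).1 := by
    intro a b ha hb hab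
    rcases Nat.lt_or_ge a b with h | h
    · exact le_of_lt (List.pairwise_iff_getElem.mp hs a b ha hb h)
    · have : a = b := by omega
      subst this; rfl
  intro lo hi
  induction hn : hi - lo using Nat.strong_induction_on generalizing lo hi with
  | _ n ih =>
  intro hlohi hhilen hlow hhigh
  by_cases hlt : lo < hi
  · have hmid : (lo + hi) / 2 < hi := by omega
    have hmidlo : lo ≤ (lo + hi) / 2 := by omega
    have hmidlen : (lo + hi) / 2 < eff.length := by omega
    rw [bsearch, dif_pos hlt, List.getD_eq_getElem eff (0, 0) hmidlen]
    split_ifs with hc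
    · exact ih (hi - ((lo + hi) / 2 + 1)) (by omega) _ _ rfl (by omega) hhilen
        (fun k hk hklo => lt_of_le_of_lt (hmono k _ hk hmidlen (by omega)) hc) hhigh
    · exact ih ((lo + hi) / 2 - lo) (by omega) _ _ rfl hmidlo (by omega) hlow
        (fun k hk hmk => le_trans (not_lt.mp hc) (hmono _ k hmidlen hk hmk))
  · rw [bsearch, dif_neg hlt]
    have hle : hi ≤ lo := by omega
    refine ⟨fun k hk => ⟨fun hlek => not_lt.mpr (hhigh k hk (by omega)),
      fun hnot => by by_contra hkl; exact hnot (hlow k hk (by omega))⟩, by omega⟩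

-- first-match lookup equals indexing at the first position satisfying el ≤ value
theorem lookup_first (el : Int) : ∀ (eff : List (Int × Nat)) (j : Nat),
    (∀ k (hk : k < eff.length), j ≤ k ↔ ¬ (eff[k]).1 < el) → j ≤ eff.length →
    lookupEff eff el = (if h : j < eff.length then some ((eff[j]).2) else none) := by
  intro eff
  induction eff with
  | nil => intro j _ hlen; simp [lookupEff]
  | cons p rest ih =>
    obtain ⟨v, idx⟩ := p
    intro j hiff hlen
    by_cases h : el ≤ v
    · have h0 : j = 0 := Nat.le_zero.mp ((hiff 0 (by simp)).mpr (not_lt.mpr h))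
      subst h0
      simp [lookupEff, h]
    · have hv : v < el := lt_of_not_ge h
      have hj1 : 1 ≤ j := by
        by_contra hc
        exact ((hiff 0 (by simp)).mp (by omega)) hv
      obtain ⟨m, rfl⟩ : ∃ m, j = m + 1 := ⟨j - 1, by omega⟩
      have hrec := ih m
        (by
          intro k hk
          have hk' := hiff (k + 1) (by simpa using Nat.succ_lt_succ hk)
          simp only [List.getElem_cons_succ] at hk'
          constructor
          · intro hle; exact hk'.mp (by omega)
          · intro hn; have := hk'.mpr hn; omega)
        (by simp at hlen; omega)
      simp only [lookupEff, if_neg h]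
      rw [hrec]
      by_cases hcmp : m < rest.length
      · rw [dif_pos hcmp, dif_pos (by simp; omega)]
        simp
      · rw [dif_neg hcmp, dif_neg (by simp; omega)]

theorem lookup_eq_bsearch (eff : List (Int × Nat)) (el : Int)
    (hs : eff.Pairwise (fun p q => p.1 < q.1)) :
    lookupEff eff el =
      (if h : bsearch eff el 0 eff.length < eff.length
       then some ((eff[bsearch eff el 0 eff.length]).2) else none) := by
  obtain ⟨hiff, hlen⟩ := bsearch_spec eff el hs 0 eff.length (by omega) le_rfl
    (by intro k hk h; omega) (by intro k hk h; omega)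
  exact lookup_first el eff _ hiff hlen

-- pointwise equality of the two fold steps
theorem step_eq (cutoffs : List Int) (el : Int) (freqs : List Int) :
    (match firstLE el cutoffs 0 with
     | some i => incAt freqs i
     | none => freqs) =
    (let eff := effList cutoffs 0 none
     let lo := bsearch eff el 0 eff.length
     if h : lo < eff.length then incAt freqs (eff[lo].2) else freqs) := by
  have h1 := firstLE_eq_lookup el cutoffs 0 none (by intro r hr; cases hr)
  have h2 := lookup_eq_bsearch (effList cutoffs 0 none) el (effList_sorted cutoffs 0 none)
  rw [h1, h2]
  by_cases h : bsearch (effList cutoffs 0 none) el 0 (effList cutoffs 0 none).length <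
      (effList cutoffs 0 none).length
  · simp [h]
  · simp [h]

theorem foldl_ext {α β : Type} (f g : β → α → β) (h : ∀ b a, f b a = g b a) :
    ∀ (l : List α) (b : β), l.foldl f b = l.foldl g b := by
  intro l
  induction l with
  | nil => intro b; rfl
  | cons a t ih => intro b; simp only [List.foldl_cons, h]; exact ih _

-- ===== VERDICT (by name: the statement is the Claim_ definition above) =====
theorem frequencies_for_cutoffs_spec : Claim_equal_frequencies_for_cutoffs := by
  intro col cutoffs _
  unfold Spec_frequencies_for_cutoffs frequencies_for_cutoffs frequencies_for_cutoffs_alt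
  exact foldl_ext _ _ (fun freqs el => step_eq cutoffs el freqs) col _
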